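-- pv_equiv track=rewrite | github.com/a1928375/Detecting-Ambiguity | Detecting Ambiguity.py | isambig
-- ===== SOURCE A (Python) =====
-- def expand(tokens_and_derivation, grammar):
--
--     (tokens, derivation) = tokens_and_derivation
--
--     for token_pos in range(len(tokens)): # for each token
--
--         for rule_index in range(len(grammar)): # for each rule
--
--             rule = grammar[rule_index]
--
--             if tokens[token_pos] == rule[0]: # token is on left hand side of rule
--
--                 yield ((tokens[0:token_pos] + rule[1] + tokens[token_pos+1:]), derivation + [rule_index])
--
-- def isambig(grammar, start, utterance):
--
--     enumerated = [([start], [])]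
--
--     while True:
--
--         new_enumerated = enumerated
--
--         # ENUMERATE
--         for u in enumerated:
--
--             for i in expand(u, grammar):
--
--                 if not i in new_enumerated:
--
--                     new_enumerated = new_enumerated + [i]
--
--         if new_enumerated != enumerated:
--
--             # Found something new keep going!
--             enumerated = new_enumerated
--
--         else:
--
--             break
--
--     return len([x for x in enumerated if x[0] == utterance]) > 1
-- ===== SOURCE B (Python) =====
-- def isambig(grammar, start, utterance):
--     root = ((start,), ())
--     seen = {root}
--     frontier = [root]
--     count = 1 if [start] == utterance else 0
--     while frontier:
--         next_frontier = []
--         for (toks, der) in frontier: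
--             for p in range(len(toks)):
--                 for ri in range(len(grammar)):
--                     rule = grammar[ri]
--                     if toks[p] == rule[0]:
--                         child = (toks[:p] + tuple(rule[1]) + toks[p + 1:], der + (ri,))
--                         if child not in seen:
--                             seen.add(child)
--                             next_frontier.append(child)
--                             if list(child[0]) == utterance:
--                                 count += 1
--         frontier = next_frontier
--     return count > 1
-- ===== Notes on version B (the rewrite author's own statement) =====
-- stated objective: alternative
-- what changed: Replaced A's restart-the-whole-scan fixpoint (every pass re-expands the entire enumeration and checks each candidate by a linear scan of the list) by a single-pass breadth-first worklist over the newly discovered frontier only, with a hash-set for membership and an incrementally maintained count of derivations matching the utterance.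
import Mathlib
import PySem

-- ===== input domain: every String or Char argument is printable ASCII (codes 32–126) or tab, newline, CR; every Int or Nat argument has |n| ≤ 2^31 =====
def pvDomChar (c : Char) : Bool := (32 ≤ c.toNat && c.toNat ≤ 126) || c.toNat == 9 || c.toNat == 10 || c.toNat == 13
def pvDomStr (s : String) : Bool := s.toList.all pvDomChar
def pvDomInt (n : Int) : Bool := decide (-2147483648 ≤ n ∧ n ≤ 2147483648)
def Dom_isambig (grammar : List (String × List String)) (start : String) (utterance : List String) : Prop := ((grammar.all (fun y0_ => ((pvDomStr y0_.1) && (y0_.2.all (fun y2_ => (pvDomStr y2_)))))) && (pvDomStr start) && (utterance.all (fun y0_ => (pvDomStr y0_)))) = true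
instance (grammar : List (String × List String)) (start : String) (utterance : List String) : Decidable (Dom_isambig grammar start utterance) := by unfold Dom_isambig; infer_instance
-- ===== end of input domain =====

-- B replaces A's restart-everything fixpoint (list-membership rescans of the whole enumeration every
-- pass) by a single-pass breadth-first worklist over the frontier with a set for membership and an
-- incrementally maintained match count (an alternative algorithm; not measurably faster on the timed
-- inputs). Proved equal on the whole domain: the two loops discover the same new elements in the same
-- order each round, so the equal-fuel ports agree on every input.


-- ===== PORT A =====
-- expand(tokens_and_derivation, grammar): the generator, materialised in yield order
def pvExpand (u : List String × List Int) (grammar : List (String × List String)) :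
    List (List String × List Int) :=
  (List.range u.1.length).flatMap (fun tokenPos =>
    (List.range grammar.length).filterMap (fun ruleIndex =>
      let rule := grammar.getD ruleIndex ("", [])
      if u.1.getD tokenPos "" = rule.1 then
        some (PySem.List.slice u.1 (some 0) (some (tokenPos : Int)) ++ rule.2 ++
                PySem.List.slice u.1 (some ((tokenPos : Int) + 1)) none,
              u.2 ++ [(ruleIndex : Int)])
      else none))

-- `if not i in new_enumerated: new_enumerated = new_enumerated + [i]`
def pvAddA (acc : List (List String × List Int)) (i : List String × List Int) :
    List (List String × List Int) :=
  if i ∈ acc then acc else acc ++ [i]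

-- one body of A's `while True`: the ENUMERATE pass over the old list
def pvPass (grammar : List (String × List String)) (enumerated : List (List String × List Int)) :
    List (List String × List Int) :=
  enumerated.foldl (fun newEnum u => (pvExpand u grammar).foldl pvAddA newEnum) enumerated

-- the `while True` loop; the fuel only makes it total (Python A diverges where it runs out)
def pvLoop (grammar : List (String × List String)) :
    Nat → List (List String × List Int) → List (List String × List Int)
  | 0, e => e
  | fuel + 1, e =>
    let n := pvPass grammar e
    if n ≠ e then pvLoop grammar fuel n else e

def isambig (grammar : List (String × List String)) (start : String) (utterance : List String) : Bool :=
  decide (1 < (pvLoop grammar 1000000 [([start], [])]).countP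
      (fun x => decide (x.1 = utterance)))

-- ===== PORT B =====
-- `if child not in seen: seen.add(child); next_frontier.append(child); if …: count += 1`
def pvAddB (utterance : List String)
    (st : List (List String × List Int) × PySem.Set (List String × List Int) × Int)
    (child : List String × List Int) :
    List (List String × List Int) × PySem.Set (List String × List Int) × Int :=
  if child ∈ st.2.1 then st
  else (st.1 ++ [child], PySem.Set.add st.2.1 child,
        if child.1 = utterance then st.2.2 + 1 else st.2.2)

-- process one frontier pair: B's two inner `for` loops
def pvStepB (grammar : List (String × List String)) (utterance : List String)
    (st : List (List String × List Int) × PySem.Set (List String × List Int) × Int)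
    (u : List String × List Int) :
    List (List String × List Int) × PySem.Set (List String × List Int) × Int :=
  (List.range u.1.length).foldl (fun st p =>
    (List.range grammar.length).foldl (fun st ri =>
      let rule := grammar.getD ri ("", [])
      if u.1.getD p "" = rule.1 then
        pvAddB utterance st
          (PySem.List.slice u.1 (some 0) (some (p : Int)) ++ rule.2 ++
             PySem.List.slice u.1 (some ((p : Int) + 1)) none,
           u.2 ++ [(ri : Int)])
      else st) st) st

-- the `while frontier` loop; the fuel only makes it total (Python B diverges where it runs out)
def pvLoopB (grammar : List (String × List String)) (utterance : List String) :
    Nat → List (List String × List Int) → PySem.Set (List String × List Int) → Int → Int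
  | 0, _, _, count => count
  | fuel + 1, frontier, seen, count =>
    if frontier = [] then count
    else
      let st := frontier.foldl (pvStepB grammar utterance) ([], seen, count)
      pvLoopB grammar utterance fuel st.1 st.2.1 st.2.2

def isambig_alt (grammar : List (String × List String)) (start : String) (utterance : List String) : Bool :=
  let root : List String × List Int := ([start], [])
  decide (1 < pvLoopB grammar utterance 1000000 [root]
      (PySem.Set.ofList [root]) (if [start] = utterance then 1 else 0))

-- ===== PRECONDITION & SPEC =====
def Spec_isambig (grammar : List (String × List String)) (start : String) (utterance : List String) (out : Bool) : Prop := out = isambig_alt grammar start utterance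
instance (grammar : List (String × List String)) (start : String) (utterance : List String) (out : Bool) : Decidable (Spec_isambig grammar start utterance out) := by unfold Spec_isambig; infer_instance

-- ===== CLAIM (what is proved, stated in full; the proofs are below) =====
def Claim_equal_isambig : Prop := ∀ (grammar : List (String × List String)) (start : String) (utterance : List String), Dom_isambig grammar start utterance → Spec_isambig grammar start utterance (isambig grammar start utterance)

-- ===== LEMMAS AND PROOFS =====

theorem pvAddA_mono {acc : List (List String × List Int)} {x : List String × List Int}
    (i : List String × List Int) (h : x ∈ acc) : x ∈ pvAddA acc i := by
  unfold pvAddA; split <;> simp [h]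

theorem pvAddA_self (acc : List (List String × List Int)) (i : List String × List Int) :
    i ∈ pvAddA acc i := by
  unfold pvAddA; split <;> simp_all

theorem pvFoldA_mono (l : List (List String × List Int)) :
    ∀ acc x, x ∈ acc → x ∈ l.foldl pvAddA acc := by
  induction l with
  | nil => intro acc x h; simpa using h
  | cons c t ih => intro acc x h; exact ih _ x (pvAddA_mono c h)

theorem pvFoldA_mem (l : List (List String × List Int)) :
    ∀ acc, ∀ i ∈ l, i ∈ l.foldl pvAddA acc := by
  induction l with
  | nil => intro acc i h; cases h
  | cons c t ih =>
    intro acc i h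
    rcases List.mem_cons.mp h with rfl | h
    · exact pvFoldA_mono t _ _ (pvAddA_self acc i)
    · exact ih _ i h

theorem pvFoldA_id (l : List (List String × List Int)) (acc : List (List String × List Int))
    (h : ∀ i ∈ l, i ∈ acc) : l.foldl pvAddA acc = acc := by
  induction l with
  | nil => rfl
  | cons c t ih =>
    simp only [List.foldl_cons]
    rw [show pvAddA acc c = acc from by unfold pvAddA; rw [if_pos (h c (by simp))]]
    exact ih (fun i hi => h i (by simp [hi]))

-- the lockstep relation between A's growing list and B's (frontier, seen, count) state
def pvRel (utterance : List String) (E : List (List String × List Int)) (c : Int)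
    (accA : List (List String × List Int))
    (st : List (List String × List Int) × PySem.Set (List String × List Int) × Int) : Prop :=
  accA = E ++ st.1 ∧ (∀ x, x ∈ st.2.1 ↔ x ∈ accA) ∧
    st.2.2 = c + ((st.1.countP (fun x => decide (x.1 = utterance)) : Nat) : Int)

theorem pvRel_add {utterance : List String} {E : List (List String × List Int)} {c : Int}
    {accA : List (List String × List Int)}
    {st : List (List String × List Int) × PySem.Set (List String × List Int) × Int}
    (h : pvRel utterance E c accA st) (i : List String × List Int) :
    pvRel utterance E c (pvAddA accA i) (pvAddB utterance st i) := by
  obtain ⟨h1, h2, h3⟩ := h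
  unfold pvAddA pvAddB
  by_cases hm : i ∈ accA
  · rw [if_pos hm, if_pos ((h2 i).mpr hm)]; exact ⟨h1, h2, h3⟩
  · rw [if_neg hm, if_neg (fun hs => hm ((h2 i).mp hs))]
    refine ⟨by simp [h1], ?_, ?_⟩
    · intro x
      rw [PySem.Set.mem_add]
      constructor
      · rintro (hx | rfl)
        · exact List.mem_append_left _ ((h2 x).mp hx)
        · simp
      · intro hx
        rcases List.mem_append.mp hx with hx | hx
        · exact Or.inl ((h2 x).mpr hx)
        · exact Or.inr (by simpa using hx)
    · simp only [List.countP_append, List.countP_cons, List.countP_nil]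
      by_cases hcu : i.1 = utterance <;> simp [hcu, h3] <;> ring

theorem pvRel_foldChildren (utterance : List String) (l : List (List String × List Int)) :
    ∀ {E c accA st}, pvRel utterance E c accA st →
      pvRel utterance E c (l.foldl pvAddA accA) (l.foldl (pvAddB utterance) st) := by
  induction l with
  | nil => intro E c accA st h; exact h
  | cons i t ih => intro E c accA st h; exact ih (pvRel_add h i)

theorem pvStepB_eq (grammar : List (String × List String)) (utterance : List String)
    (st : List (List String × List Int) × PySem.Set (List String × List Int) × Int)
    (u : List String × List Int) :
    pvStepB grammar utterance st u = (pvExpand u grammar).foldl (pvAddB utterance) st := by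
  unfold pvStepB pvExpand
  rw [List.foldl_flatMap]
  refine PySem.List.foldl_congr_mem _ _ _ _ ?_
  intro acc p _
  rw [List.foldl_filterMap]
  refine PySem.List.foldl_congr_mem _ _ _ _ ?_
  intro acc2 ri _
  simp only [List.getD_eq_getElem?_getD]
  by_cases h : u.1[p]?.getD "" = (grammar[ri]?.getD ("", [])).1 <;> simp [h]

theorem pvRel_foldFrontier (grammar : List (String × List String)) (utterance : List String)
    (F : List (List String × List Int)) :
    ∀ {E c accA st}, pvRel utterance E c accA st →
      pvRel utterance E c
        (F.foldl (fun a u => (pvExpand u grammar).foldl pvAddA a) accA)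
        (F.foldl (pvStepB grammar utterance) st) := by
  induction F with
  | nil => intro E c accA st h; exact h
  | cons u t ih =>
    intro E c accA st h
    simp only [List.foldl_cons]
    rw [pvStepB_eq]
    exact ih (pvRel_foldChildren utterance _ h)

theorem pvFoldOuter_mono (grammar : List (String × List String))
    (F : List (List String × List Int)) :
    ∀ acc x, x ∈ acc →
      x ∈ F.foldl (fun a u => (pvExpand u grammar).foldl pvAddA a) acc := by
  induction F with
  | nil => intro acc x h; simpa using h
  | cons u t ih => intro acc x h; exact ih _ x (pvFoldA_mono _ _ x h)

theorem pvFoldOuter_children (grammar : List (String × List String))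
    (F : List (List String × List Int)) :
    ∀ acc, ∀ u ∈ F, ∀ i ∈ pvExpand u grammar,
      i ∈ F.foldl (fun a u => (pvExpand u grammar).foldl pvAddA a) acc := by
  induction F with
  | nil => intro acc u h; cases h
  | cons v t ih =>
    intro acc u hu i hi
    rcases List.mem_cons.mp hu with rfl | hu
    · exact pvFoldOuter_mono grammar t _ i (pvFoldA_mem _ _ i hi)
    · exact ih _ u hu i hi

theorem pvFoldOuter_id (grammar : List (String × List String))
    (P : List (List String × List Int)) (acc : List (List String × List Int))
    (h : ∀ u ∈ P, ∀ i ∈ pvExpand u grammar, i ∈ acc) :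
    P.foldl (fun a u => (pvExpand u grammar).foldl pvAddA a) acc = acc := by
  induction P with
  | nil => rfl
  | cons u t ih =>
    simp only [List.foldl_cons]
    rw [pvFoldA_id _ _ (h u (by simp))]
    exact ih (fun v hv => h v (by simp [hv]))

-- the lockstep theorem: with equal fuel, B's count is the countP of A's enumeration
theorem pvLoopB_nil (grammar : List (String × List String)) (utterance : List String)
    (fuel : Nat) (S : PySem.Set (List String × List Int)) (c : Int) :
    pvLoopB grammar utterance fuel [] S c = c := by
  cases fuel <;> simp [pvLoopB]

theorem pvLoop_corr (grammar : List (String × List String)) (utterance : List String) :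
    ∀ (fuel : Nat) (E F : List (List String × List Int))
      (S : PySem.Set (List String × List Int)) (c : Int),
      (∃ P, E = P ++ F ∧ ∀ u ∈ P, ∀ i ∈ pvExpand u grammar, i ∈ E) →
      (∀ x, x ∈ S ↔ x ∈ E) →
      c = ((E.countP (fun x => decide (x.1 = utterance)) : Nat) : Int) →
      pvLoopB grammar utterance fuel F S c
        = (((pvLoop grammar fuel E).countP (fun x => decide (x.1 = utterance)) : Nat) : Int) := by
  intro fuel
  induction fuel with
  | zero => intro E F S c _ _ hc; simpa [pvLoopB, pvLoop] using hc
  | succ f ih =>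
    intro E F S c hP hS hc
    obtain ⟨P, rfl, hproc⟩ := hP
    have hA1 : pvLoop grammar (f + 1) (P ++ F)
        = if pvPass grammar (P ++ F) ≠ (P ++ F) then pvLoop grammar f (pvPass grammar (P ++ F))
          else (P ++ F) := rfl
    by_cases hF : F = []
    · subst hF
      have hpass : pvPass grammar (P ++ []) = P ++ [] := by
        unfold pvPass
        rw [List.foldl_append]
        simp only [List.foldl_nil]
        exact pvFoldOuter_id grammar _ _ hproc
      have hB1 : pvLoopB grammar utterance (f + 1) [] S c = c := pvLoopB_nil _ _ _ _ _
      rw [hB1, hA1, if_neg (by rw [hpass]; simp), hc]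
    · -- F nonempty: one pass of A corresponds to one frontier round of B
      have hrel0 : pvRel utterance (P ++ F) c (P ++ F) ([], S, c) := ⟨by simp, hS, by simp [hc]⟩
      have hrel := pvRel_foldFrontier grammar utterance F hrel0
      set st := F.foldl (pvStepB grammar utterance) ([], S, c) with hst
      obtain ⟨hEq, hMem, hC⟩ := hrel
      have hpass : pvPass grammar (P ++ F) = (P ++ F) ++ st.1 := by
        unfold pvPass
        rw [List.foldl_append, pvFoldOuter_id grammar P _ hproc]
        exact hEq
      have hB1 : pvLoopB grammar utterance (f + 1) F S c
          = pvLoopB grammar utterance f st.1 st.2.1 st.2.2 := by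
        show (if F = [] then c
              else pvLoopB grammar utterance f st.1 st.2.1 st.2.2) = _
        rw [if_neg hF]
      by_cases hN : st.1 = []
      · -- nothing new: A's pass is a no-op and both loops stop with the same value
        have hA : pvLoop grammar (f + 1) (P ++ F) = P ++ F := by
          rw [hA1, if_neg (by simp [hpass, hN])]
        rw [hB1, hN, pvLoopB_nil, hA, hC, hN, hc]
        simp
      · -- new elements: both loops continue in lockstep on the extended enumeration
        have hne : pvPass grammar (P ++ F) ≠ (P ++ F) := by
          rw [hpass]
          intro h
          have hlen := congrArg List.length h
          simp only [List.length_append] at hlen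
          exact hN (List.length_eq_zero_iff.mp (by omega))
        have hA : pvLoop grammar (f + 1) (P ++ F)
            = pvLoop grammar f ((P ++ F) ++ st.1) := by
          rw [hA1, if_pos hne, hpass]
        rw [hB1, hA]
        refine ih ((P ++ F) ++ st.1) st.1 st.2.1 st.2.2 ⟨P ++ F, rfl, ?_⟩ ?_ ?_
        · intro u hu i hi
          rcases List.mem_append.mp hu with hu | hu
          · exact List.mem_append_left _ (hproc u hu i hi)
          · rw [← hEq]; exact pvFoldOuter_children grammar F _ u hu i hi
        · intro x; rw [hMem, hEq]
        · rw [hC, hc]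
          simp only [List.countP_append]
          push_cast
          ring

-- ===== VERDICT (by name: the statement is the Claim_ definition above) =====
theorem isambig_spec : Claim_equal_isambig := by
  intro grammar start utterance _hdom
  unfold Spec_isambig isambig isambig_alt
  dsimp only
  rw [pvLoop_corr grammar utterance 1000000 [([start], [])] [([start], [])]
      (PySem.Set.ofList [([start], [])]) (if [start] = utterance then 1 else 0)
      ⟨[], rfl, by intro u h; cases h⟩
      (by intro x; rw [PySem.Set.mem_ofList])
      (by by_cases h : [start] = utterance <;> simp [h])]
  simp only [decide_eq_decide]
  omega
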